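-- pv_equiv track=rewrite | github.com/RescueDiver/arcs4 | vision/global_pattern_reader.py | repeated_col_count
-- ===== SOURCE A (Python) =====
-- from collections import Counter
--
-- def grid_h(grid):
--     return len(grid)
--
-- def grid_w(grid):
--     return len(grid[0]) if grid else 0
--
-- def repeated_col_count(grid):
--     h = grid_h(grid)
--     w = grid_w(grid)
--     cols = []
--     for c in range(w):
--         cols.append(tuple(grid[r][c] for r in range(h)))
--     seen = Counter(cols)
--     return sum(count - 1 for count in seen.values() if count > 1)
-- ===== SOURCE B (Python) =====
-- def repeated_col_count(grid):
--     w = len(grid[0]) if grid else 0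
--     dup = 0
--     for c in range(w):
--         if any(all(row[c2] == row[c] for row in grid) for c2 in range(c)):
--             dup += 1
--     return dup
-- ===== Notes on version B (the rewrite author's own statement) =====
-- stated objective: alternative
-- what changed: Replaces A's build-all-column-tuples-then-Counter tally with a direct pairwise scan: for each column it checks element-wise whether it equals some earlier column and counts such columns, using no tuples, hashing or Counter.
import Mathlib
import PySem

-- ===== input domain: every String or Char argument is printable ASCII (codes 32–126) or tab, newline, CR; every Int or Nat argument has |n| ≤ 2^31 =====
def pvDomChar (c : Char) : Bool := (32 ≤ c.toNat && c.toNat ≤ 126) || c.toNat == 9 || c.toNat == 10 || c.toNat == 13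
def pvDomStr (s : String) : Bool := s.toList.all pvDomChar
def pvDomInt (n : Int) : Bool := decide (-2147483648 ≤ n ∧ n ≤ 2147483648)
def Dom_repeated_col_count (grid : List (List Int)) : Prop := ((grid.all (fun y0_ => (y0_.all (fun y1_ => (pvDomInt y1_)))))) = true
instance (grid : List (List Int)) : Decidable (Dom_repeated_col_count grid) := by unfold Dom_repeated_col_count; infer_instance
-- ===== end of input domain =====

-- B replaces A's Counter-of-column-tuples tally by a direct pairwise scan that
-- counts columns equal to some earlier column (alternative algorithm, same results).


-- ===== PORT A =====
def grid_h (grid : List (List Int)) : Int := grid.length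

def grid_w (grid : List (List Int)) : Int :=
  if grid = [] then 0 else ((grid.headD []).length : Int)

def repeated_col_count (grid : List (List Int)) : Int :=
  let h := grid_h grid
  let w := grid_w grid
  let cols : List (List Int) :=
    (PySem.List.pyRange 0 w 1).map (fun c =>
      (PySem.List.pyRange 0 h 1).map (fun r =>
        PySem.List.pyGetD (PySem.List.pyGetD grid r []) c 0))
  let seen := PySem.Dict.counter cols
  (((PySem.Dict.values seen).filter (fun count => count > 1)).map (fun count => count - 1)).sum

-- ===== PORT B =====
def repeated_col_count_alt (grid : List (List Int)) : Int :=
  let w : Int := if grid = [] then 0 else ((grid.headD []).length : Int)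
  (PySem.List.pyRange 0 w 1).foldl (fun dup c =>
    if (PySem.List.pyRange 0 c 1).any (fun c2 =>
        grid.all (fun row => PySem.List.pyGetD row c2 0 == PySem.List.pyGetD row c 0))
    then dup + 1 else dup) 0

-- ===== PRECONDITION & SPEC =====
-- Pre_ excludes exactly the ragged grids on which A's grid[r][c] raises IndexError
-- (a row shorter than the first row's width).
def Pre_repeated_col_count (grid : List (List Int)) : Prop :=
  ∀ row ∈ grid, (grid.headD []).length ≤ row.length
instance (grid : List (List Int)) : Decidable (Pre_repeated_col_count grid) := by
  unfold Pre_repeated_col_count; infer_instance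

def pvWitness_repeated_col_count : List (List Int) := [[1, 2], [1, 3]]

def Spec_repeated_col_count (grid : List (List Int)) (out : Int) : Prop := out = repeated_col_count_alt grid
instance (grid : List (List Int)) (out : Int) : Decidable (Spec_repeated_col_count grid out) := by unfold Spec_repeated_col_count; infer_instance

-- ===== CLAIM (what is proved, stated in full; the proofs are below) =====
def Claim_equal_repeated_col_count : Prop := ∀ (grid : List (List Int)), Dom_repeated_col_count grid → Pre_repeated_col_count grid → Spec_repeated_col_count grid (repeated_col_count grid)

-- ===== LEMMAS AND PROOFS =====

-- A sum of (v-1) over the values > 1 equals the whole sum minus the length, when all values are ≥ 1.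
lemma sum_filter_sub_one (l : List Int) (h : ∀ v ∈ l, 1 ≤ v) :
    ((l.filter (fun v => v > 1)).map (fun v => v - 1)).sum = l.sum - l.length := by
  induction l with
  | nil => simp
  | cons v t ih =>
    have hv : 1 ≤ v := h v (by simp)
    have ht := ih (fun x hx => h x (by simp [hx]))
    by_cases hv1 : v > 1
    · simp [hv1, ht]; ring
    · have : v = 1 := by omega
      simp [this, ht]; ring

-- Summing the multiplicities over a nodup list covering cols recovers the length.
lemma sum_counts_eq_length (S : List (List Int)) (cols : List (List Int)) (hn : S.Nodup)
    (hm : ∀ x ∈ cols, x ∈ S) :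
    (S.map (fun k => cols.count k)).sum = cols.length := by
  induction S generalizing cols with
  | nil =>
    cases cols with
    | nil => simp
    | cons c t => exact absurd (hm c (by simp)) (by simp)
  | cons k S' ih =>
    have hkS' : k ∉ S' := (List.nodup_cons.mp hn).1
    have hn' : S'.Nodup := (List.nodup_cons.mp hn).2
    have hm' : ∀ x ∈ cols.filter (fun x => !(x == k)), x ∈ S' := by
      intro x hx
      rcases List.mem_filter.mp hx with ⟨hxc, hxk⟩
      have hxS := hm x hxc
      simp only [Bool.not_eq_eq_eq_not, Bool.not_true, beq_eq_false_iff_ne, ne_eq] at hxk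
      rcases List.mem_cons.mp hxS with h | h
      · exact absurd h hxk
      · exact h
    have hIH := ih (cols.filter (fun x => !(x == k))) hn' hm'
    have hmap : S'.map (fun k' => (cols.filter (fun x => !(x == k))).count k')
        = S'.map (fun k' => cols.count k') := by
      apply List.map_congr_left
      intro k' hk'
      have hne : k' ≠ k := fun h => hkS' (h ▸ hk')
      rw [List.count_filter]
      simp [hne]
    have h1 : cols.count k = (cols.filter (fun x => x == k)).length := by
      simp [List.count_eq_countP, List.countP_eq_length_filter]
    have h2 : cols.length = (cols.filter (fun x => x == k)).length
        + (cols.filter (fun x => !(x == k))).length :=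
      List.length_eq_length_filter_add _
    rw [List.map_cons, List.sum_cons, ← hmap, hIH, h1]
    omega

-- A's aggregation over the Counter equals "total minus distinct".
lemma counter_agg (cols : List (List Int)) :
    (((PySem.Dict.values (PySem.Dict.counter cols)).filter (fun v => v > 1)).map (fun v => v - 1)).sum
      = (cols.length : Int) - ((PySem.Set.ofList cols).length : Int) := by
  have hvals : PySem.Dict.values (PySem.Dict.counter cols)
      = (PySem.Set.ofList cols).map (fun k => (cols.count k : Int)) := by
    simp [PySem.Dict.values, PySem.Dict.items_counter, List.map_map, Function.comp]
  set S := PySem.Set.ofList cols with hS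
  have hge : ∀ v ∈ S.map (fun k => (cols.count k : Int)), 1 ≤ v := by
    intro v hv
    rcases List.mem_map.mp hv with ⟨k, hk, rfl⟩
    have hkc : k ∈ cols := (PySem.Set.mem_ofList cols k).mp hk
    have := List.count_pos_iff.mpr hkc
    omega
  have hsum : (S.map (fun k => (cols.count k : Int))).sum = (cols.length : Int) := by
    have hN := sum_counts_eq_length S cols (PySem.Set.nodup_ofList cols)
      (fun x hx => (PySem.Set.mem_ofList cols x).mpr hx)
    have hcast : (S.map (fun k => (cols.count k : Int))).sum
        = ((S.map (fun k => cols.count k)).sum : Int) := by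
      rw [Nat.cast_list_sum, List.map_map]; rfl
    rw [hcast, hN]
  rw [hvals, sum_filter_sub_one _ hge, hsum]
  simp

-- The column built by A from grid[r][c] over r in range(h) is grid mapped through row[c].
lemma colA_eq_colB (grid : List (List Int)) (c : Int) :
    (PySem.List.pyRange 0 (grid_h grid) 1).map (fun r =>
        PySem.List.pyGetD (PySem.List.pyGetD grid r []) c 0)
      = grid.map (fun row => PySem.List.pyGetD row c 0) := by
  have h1 : (PySem.List.pyRange 0 (grid_h grid) 1).map (fun r =>
        PySem.List.pyGetD (PySem.List.pyGetD grid r []) c 0)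
      = ((PySem.List.pyRange 0 (grid_h grid) 1).map (fun r =>
        PySem.List.pyGetD grid r [])).map (fun row => PySem.List.pyGetD row c 0) := by
    rw [List.map_map]; rfl
  rw [h1, grid_h, PySem.List.map_pyGetD_pyRange_zero']

-- B's element-wise all over the rows tests equality of the two column lists.
lemma all_eq_map (grid : List (List Int)) (c2 c : Int) :
    (grid.all (fun row => PySem.List.pyGetD row c2 0 == PySem.List.pyGetD row c 0))
      = (grid.map (fun row => PySem.List.pyGetD row c2 0)
          == grid.map (fun row => PySem.List.pyGetD row c 0)) := by
  rw [Bool.eq_iff_iff]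
  simp only [List.all_eq_true, beq_iff_eq, List.map_inj_left]

-- B's loop counts columns with an earlier equal column; that is total minus distinct.
lemma loop_count (col : Int → List Int) (n : Nat) :
    (PySem.List.pyRange 0 (n : Int) 1).foldl
      (fun dup c => if (PySem.List.pyRange 0 c 1).any (fun c2 => col c2 == col c)
        then dup + 1 else dup) (0 : Int)
    = (n : Int) - ((PySem.Set.ofList ((PySem.List.pyRange 0 (n : Int) 1).map col)).length : Int) := by
  induction n with
  | zero =>
    rw [Nat.cast_zero, PySem.List.pyRange_one_eq_nil le_rfl]
    simp [PySem.Set.ofList]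
  | succ n ih =>
    have hsp : PySem.List.pyRange 0 ((n + 1 : Nat) : Int) 1
        = PySem.List.pyRange 0 (n : Int) 1 ++ [(n : Int)] := by
      push_cast
      exact PySem.List.pyRange_one_succ_right (by exact_mod_cast Nat.zero_le n)
    rw [hsp, List.foldl_append, ih, List.map_append, List.map_cons, List.map_nil]
    simp only [List.foldl_cons, List.foldl_nil]
    have hofl : PySem.Set.ofList ((PySem.List.pyRange 0 (n : Int) 1).map col ++ [col (n : Int)])
        = PySem.Set.add (PySem.Set.ofList ((PySem.List.pyRange 0 (n : Int) 1).map col)) (col (n : Int)) := by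
      rw [PySem.Set.ofList_eq_foldl, PySem.Set.ofList_eq_foldl, List.foldl_append]
      rfl
    by_cases hmem : col (n : Int) ∈ (PySem.List.pyRange 0 (n : Int) 1).map col
    · have hany : (PySem.List.pyRange 0 (n : Int) 1).any (fun c2 => col c2 == col (n : Int)) = true := by
        rcases List.mem_map.mp hmem with ⟨c2, hc2, heq⟩
        exact List.any_eq_true.mpr ⟨c2, hc2, by simp [heq]⟩
      have hsetmem : col (n : Int) ∈ PySem.Set.ofList ((PySem.List.pyRange 0 (n : Int) 1).map col) :=
        (PySem.Set.mem_ofList _ _).mpr hmem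
      have hadd : PySem.Set.add (PySem.Set.ofList ((PySem.List.pyRange 0 (n : Int) 1).map col)) (col (n : Int))
          = PySem.Set.ofList ((PySem.List.pyRange 0 (n : Int) 1).map col) := by
        unfold PySem.Set.add
        simp [hsetmem]
      rw [hany, if_pos rfl, hofl, hadd]
      push_cast
      ring
    · have hany : (PySem.List.pyRange 0 (n : Int) 1).any (fun c2 => col c2 == col (n : Int)) = false := by
        rw [List.any_eq_false]
        intro c2 hc2
        simp only [beq_iff_eq]
        intro heq
        exact hmem (List.mem_map.mpr ⟨c2, hc2, heq⟩)
      have hsetmem : col (n : Int) ∉ PySem.Set.ofList ((PySem.List.pyRange 0 (n : Int) 1).map col) := fun h =>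
        hmem ((PySem.Set.mem_ofList _ _).mp h)
      have hadd : PySem.Set.add (PySem.Set.ofList ((PySem.List.pyRange 0 (n : Int) 1).map col)) (col (n : Int))
          = PySem.Set.ofList ((PySem.List.pyRange 0 (n : Int) 1).map col) ++ [col (n : Int)] := by
        unfold PySem.Set.add
        simp [hsetmem]
      rw [hofl, hadd]
      simp only [hany, Bool.false_eq_true, if_false, List.length_append, List.length_cons,
        List.length_nil]
      push_cast
      ring

-- ===== VERDICT (by name: the statement is the Claim_ definition above) =====
theorem repeated_col_count_spec : Claim_equal_repeated_col_count := by
  intro grid _ _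
  unfold Spec_repeated_col_count repeated_col_count repeated_col_count_alt
  simp only []
  have hw : grid_w grid = if grid = [] then 0 else ((grid.headD []).length : Int) := rfl
  set w := grid_w grid with hwdef
  rw [← hw]
  have hw0 : 0 ≤ w := by rw [hw]; split <;> simp
  have hcols : (PySem.List.pyRange 0 w 1).map (fun c =>
        (PySem.List.pyRange 0 (grid_h grid) 1).map (fun r =>
          PySem.List.pyGetD (PySem.List.pyGetD grid r []) c 0))
      = (PySem.List.pyRange 0 w 1).map (fun c => grid.map (fun row => PySem.List.pyGetD row c 0)) := by
    apply List.map_congr_left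
    intro c _
    exact colA_eq_colB grid c
  rw [hcols, counter_agg]
  have hfun : (fun (dup : Int) (c : Int) => if (PySem.List.pyRange 0 c 1).any (fun c2 =>
        grid.all (fun row => PySem.List.pyGetD row c2 0 == PySem.List.pyGetD row c 0))
      then dup + 1 else dup)
      = (fun (dup : Int) (c : Int) => if (PySem.List.pyRange 0 c 1).any (fun c2 =>
        (fun c' => grid.map (fun row => PySem.List.pyGetD row c' 0)) c2
          == (fun c' => grid.map (fun row => PySem.List.pyGetD row c' 0)) c)
      then dup + 1 else dup) := by
    funext dup c
    simp only [all_eq_map]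
  have hn : w = ((w.toNat : Nat) : Int) := (Int.toNat_of_nonneg hw0).symm
  rw [hfun, hn, loop_count (fun c => grid.map (fun row => PySem.List.pyGetD row c 0)) w.toNat]
  have hlen : (((PySem.List.pyRange 0 ((w.toNat : Nat) : Int) 1).map
      (fun c => grid.map (fun row => PySem.List.pyGetD row c 0))).length : Int)
      = ((w.toNat : Nat) : Int) := by
    rw [List.length_map, PySem.List.length_pyRange_one]
    omega
  rw [hlen]
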